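-- pv_equiv track=rewrite | github.com/Lndr2501/HMod | main.py | calculate_experience
-- ===== SOURCE A (Python) =====
-- def calculate_experience(level):
--     experience_maximum = 0
--
--     if level == 0:
--         return [0, 1]
--
--     for x in range(level):
--         x += 1
--         experience_maximum += x * 100
--
--     experience_minimum = experience_maximum - level * 100
--
--     return [experience_minimum, experience_maximum]
-- ===== SOURCE B (Python) =====
-- def calculate_experience(level):
--     if level == 0:
--         return [0, 1]
--     experience_maximum = 50 * level * (level + 1) if level > 0 else 0
--     return [experience_maximum - 100 * level, experience_maximum]
-- ===== Notes on version B (the rewrite author's own statement) =====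
-- stated objective: faster
-- what changed: Replaces the O(level) accumulation loop over range(level) with the closed-form triangular-number formula 50*level*(level+1) (0 for negative levels, where the loop is empty).
import Mathlib
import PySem

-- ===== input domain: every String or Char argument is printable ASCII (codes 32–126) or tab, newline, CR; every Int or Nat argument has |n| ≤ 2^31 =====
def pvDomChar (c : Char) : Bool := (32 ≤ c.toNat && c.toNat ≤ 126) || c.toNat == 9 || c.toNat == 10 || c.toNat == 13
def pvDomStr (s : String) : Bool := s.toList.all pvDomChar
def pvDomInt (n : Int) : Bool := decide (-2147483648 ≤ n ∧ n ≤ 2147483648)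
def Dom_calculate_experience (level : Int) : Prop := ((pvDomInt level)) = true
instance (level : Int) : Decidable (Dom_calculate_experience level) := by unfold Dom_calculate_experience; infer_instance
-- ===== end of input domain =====

-- B replaces A's O(level) accumulation loop with the closed-form formula 50*level*(level+1).

-- ===== PORT A =====
def calculate_experience (level : Int) : List Int :=
  let experience_maximum : Int := 0
  if level == 0 then [0, 1]
  else
    let experience_maximum :=
      (PySem.List.pyRange 0 level 1).foldl (fun acc x => acc + (x + 1) * 100) experience_maximum
    let experience_minimum := experience_maximum - level * 100
    [experience_minimum, experience_maximum]

-- ===== PORT B =====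
def calculate_experience_alt (level : Int) : List Int :=
  if level == 0 then [0, 1]
  else
    let experience_maximum : Int := if level > 0 then 50 * level * (level + 1) else 0
    [experience_maximum - 100 * level, experience_maximum]

-- ===== PRECONDITION & SPEC =====
def Spec_calculate_experience (level : Int) (out : List Int) : Prop := out = calculate_experience_alt level
instance (level : Int) (out : List Int) : Decidable (Spec_calculate_experience level out) := by unfold Spec_calculate_experience; infer_instance

-- ===== CLAIM (what is proved, stated in full; the proofs are below) =====
def Claim_equal_calculate_experience : Prop := ∀ (level : Int), Dom_calculate_experience level → Spec_calculate_experience level (calculate_experience level)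

-- ===== LEMMAS AND PROOFS =====

-- the loop accumulates the triangular sum: fold over range(n) of (x+1)*100 starting at c
theorem pv_fold_tri (n : Nat) (c : Int) :
    (PySem.List.pyRange 0 (n : Int) 1).foldl (fun acc x => acc + (x + 1) * 100) c
      = c + 50 * (n : Int) * ((n : Int) + 1) := by
  induction n generalizing c with
  | zero => simp [PySem.List.pyRange_one_eq_nil]
  | succ m ih =>
    have h : ((m : Int) + 1) = ((m + 1 : Nat) : Int) := by push_cast; ring
    rw [show ((m + 1 : Nat) : Int) = (m : Int) + 1 by push_cast; ring,
        PySem.List.pyRange_one_succ_right (by positivity), List.foldl_append, ih]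
    simp; ring

-- ===== VERDICT (by name: the statement is the Claim_ definition above) =====
theorem calculate_experience_spec : Claim_equal_calculate_experience := by
  intro level _
  unfold Spec_calculate_experience calculate_experience calculate_experience_alt
  by_cases h0 : level = 0
  · simp [h0]
  · simp only [beq_iff_eq, h0, if_false]
    by_cases hp : level > 0
    · have : level = ((level.toNat : Nat) : Int) := (Int.toNat_of_nonneg (by omega)).symm
      rw [this] at *
      rw [pv_fold_tri level.toNat 0]
      simp [hp]
      ring
    · rw [PySem.List.pyRange_one_eq_nil (by omega)]
      simp [hp]
      ring
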